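-- pv_equiv track=rewrite | github.com/chk7082/Algorithm | Course/SW문제해결응용 문제풀이 5/jingi_bread_store.py | jingi_bread_store
-- ===== SOURCE A (Python) =====
-- def jingi_bread_store(N, M, K, customer):
--     '''
--     function that return 'Possible', if jingi can give bread to all customers without waiting
--                        'Impossible', otherwise
--
--     :param
--     N (int) : the number of customer today
--     M (int) : the amount of time(second) to make K bread
--     K (int) : the amount of bread could be made after M seconds
--     customer (list) : the list containing the arrival time for each N customers
--
--     :return
--     result (str) : 'Possible', if jingi can give bread to all customers without waiting
--                  'Impossible', otherwise
--     '''
--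
--     # sort the customer (in increasing order)
--     customer_sorted = sorted(customer)
--
--     # check for each customer sequentially
--     # given to store the number of previously given bread
--     # since customer_sorted : sorted in increasing order
--     # we could just determine whether it's possible or not
--     # by only the given & time below
--
--     for given, time in enumerate(customer_sorted):
--         total_bread_can_be_made_until_now = (time // M) * K
--
--         # since we need (given + 1) - many bread until now
--         if total_bread_can_be_made_until_now <= given:
--             return 'Impossible'
--
--     # for - else
--     else:
--         return 'Possible'
-- ===== SOURCE B (Python) =====
-- def jingi_bread_store(N, M, K, customer):
--     # no sorting: for each distinct arrival time t, all customers arrived by t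
--     # must be coverable by the bread producible by time t
--     if any((t // M) * K < sum(1 for u in customer if u <= t) for t in set(customer)):
--         return 'Impossible'
--     return 'Possible'
-- ===== Notes on version B (the rewrite author's own statement) =====
-- stated objective: alternative
-- what changed: Drops the sort and the sequential scan entirely: B checks, for each distinct arrival time t (a set), whether the bread producible by t covers the count of all customers with arrival <= t; an existential rank test replaces sort-then-ordered-scan.
import Mathlib
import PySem

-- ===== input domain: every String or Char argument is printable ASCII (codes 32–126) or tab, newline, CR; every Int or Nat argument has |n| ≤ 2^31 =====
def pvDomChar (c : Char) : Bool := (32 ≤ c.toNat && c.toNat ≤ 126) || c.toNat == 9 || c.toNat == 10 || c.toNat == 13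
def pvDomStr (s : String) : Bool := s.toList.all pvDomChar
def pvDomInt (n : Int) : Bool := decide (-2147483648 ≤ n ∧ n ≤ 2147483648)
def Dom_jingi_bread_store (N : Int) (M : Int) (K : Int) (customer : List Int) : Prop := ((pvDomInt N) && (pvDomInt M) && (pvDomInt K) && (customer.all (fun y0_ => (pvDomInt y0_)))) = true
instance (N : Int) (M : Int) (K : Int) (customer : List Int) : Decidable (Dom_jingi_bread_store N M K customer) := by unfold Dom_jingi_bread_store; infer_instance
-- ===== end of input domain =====

-- B drops the sort and the sequential scan: for each distinct arrival time t it tests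
-- whether bread producible by t covers the count of all customers arrived by t
-- (objective: alternative algorithm, an existential rank check instead of sort-then-scan).

-- ===== PORT A =====
-- the 'for given, time in enumerate(customer_sorted)' loop with early return
def pvLoopA (M K : Int) : Int → List Int → String
  | _, [] => "Possible"
  | given, t :: rest =>
    if (PySem.Int.floordiv t M) * K ≤ given then "Impossible"
    else pvLoopA M K (given + 1) rest

def jingi_bread_store (N : Int) (M : Int) (K : Int) (customer : List Int) : String :=
  pvLoopA M K 0 (PySem.List.sorted customer (fun x => x) false)

-- ===== PORT B =====
-- 'if any((t // M) * K < sum(1 for u in customer if u <= t) for t in set(customer)): ...'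
-- (any over a set is order-independent); sum(1 for u in customer if u <= t) = countP
def jingi_bread_store_alt (N : Int) (M : Int) (K : Int) (customer : List Int) : String :=
  if (PySem.Set.ofList customer).any
      (fun t => decide ((PySem.Int.floordiv t M) * K <
        (customer.countP (fun u => decide (u ≤ t)) : Int)))
  then "Impossible" else "Possible"

-- ===== PRECONDITION & SPEC =====
-- Pre_ excludes M = 0 with a nonempty customer list: there both Pythons raise ZeroDivisionError.
def Pre_jingi_bread_store (N : Int) (M : Int) (K : Int) (customer : List Int) : Prop :=
  M ≠ 0 ∨ customer = []
instance (N : Int) (M : Int) (K : Int) (customer : List Int) : Decidable (Pre_jingi_bread_store N M K customer) := by unfold Pre_jingi_bread_store; infer_instance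
def pvWitness_jingi_bread_store : Int × Int × Int × List Int := (3, 2, 1, [0, 3, 5])

def Spec_jingi_bread_store (N : Int) (M : Int) (K : Int) (customer : List Int) (out : String) : Prop := out = jingi_bread_store_alt N M K customer
instance (N : Int) (M : Int) (K : Int) (customer : List Int) (out : String) : Decidable (Spec_jingi_bread_store N M K customer out) := by unfold Spec_jingi_bread_store; infer_instance

-- ===== CLAIM (what is proved, stated in full; the proofs are below) =====
def Claim_equal_jingi_bread_store : Prop := ∀ (N : Int) (M : Int) (K : Int) (customer : List Int), Dom_jingi_bread_store N M K customer → Pre_jingi_bread_store N M K customer → Spec_jingi_bread_store N M K customer (jingi_bread_store N M K customer)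

-- ===== LEMMAS AND PROOFS =====

-- A's scan over a nondecreasing list succeeds iff every element t satisfies the
-- rank inequality g + #{u ∈ L | u ≤ t} ≤ (t//M)*K
lemma loopA_char (M K : Int) : ∀ (L : List Int), L.Pairwise (· ≤ ·) → ∀ g : Int,
    pvLoopA M K g L =
      (if ∀ t ∈ L, g + (L.countP (fun u => decide (u ≤ t)) : Int) ≤ (PySem.Int.floordiv t M) * K
       then "Possible" else "Impossible") := by
  intro L
  induction L with
  | nil => intro _ g; simp [pvLoopA]
  | cons a rest ih =>
    intro hpw g
    have ha : ∀ t ∈ rest, a ≤ t := by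
      intro t ht; exact (List.pairwise_cons.mp hpw).1 t ht
    have hrest := ih (List.pairwise_cons.mp hpw).2 (g + 1)
    -- countP over a :: rest, for t in the list (so a ≤ t)
    have hcnt : ∀ t, a ≤ t →
        ((a :: rest).countP (fun u => decide (u ≤ t)) : Int) =
        (rest.countP (fun u => decide (u ≤ t)) : Int) + 1 := by
      intro t hat
      simp [List.countP_cons, hat]
    have key : (∀ t ∈ a :: rest,
          g + ((a :: rest).countP (fun u => decide (u ≤ t)) : Int) ≤ (PySem.Int.floordiv t M) * K)
        ↔ (¬ ((PySem.Int.floordiv a M) * K ≤ g) ∧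
           ∀ t ∈ rest,
             (g + 1) + (rest.countP (fun u => decide (u ≤ t)) : Int) ≤ (PySem.Int.floordiv t M) * K) := by
      constructor
      · intro h
        have hAll : ∀ t ∈ a :: rest,
            (g + 1) + (rest.countP (fun u => decide (u ≤ t)) : Int) ≤ (PySem.Int.floordiv t M) * K := by
          intro t ht
          have hat : a ≤ t := by
            rcases List.mem_cons.mp ht with h1 | h1
            · exact le_of_eq h1.symm
            · exact ha t h1
          have := h t ht
          rw [hcnt t hat] at this
          omega
        refine ⟨?_, fun t ht => hAll t (List.mem_cons_of_mem a ht)⟩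
        have h0 := hAll a (List.mem_cons_self ..)
        have hnn : (0 : Int) ≤ (rest.countP (fun u => decide (u ≤ a)) : Int) := Int.natCast_nonneg _
        omega
      · rintro ⟨h1, h2⟩
        intro t ht
        rcases List.mem_cons.mp ht with he | hm
        · subst he
          rw [hcnt t le_rfl]
          by_cases hz : rest.countP (fun u => decide (u ≤ t)) = 0
          · rw [hz]; simpa using by omega
          · -- some u ∈ rest has u ≤ t(= a); minimality gives u = t, use h2 at u
            have : ∃ u ∈ rest, decide (u ≤ t) = true := by
              by_contra hc
              push_neg at hc
              exact hz (List.countP_eq_zero.mpr (by intro u hu; simp at hc ⊢; exact hc u hu))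
            rcases this with ⟨u, hu, hule⟩
            have hule' : u ≤ t := of_decide_eq_true hule
            have hta : t ≤ u := ha u hu
            have hut : u = t := le_antisymm hule' hta
            have := h2 u hu
            subst hut
            omega
        · rw [hcnt t (ha t hm)]
          have := h2 t hm
          omega
    simp only [pvLoopA]
    by_cases hfa : (PySem.Int.floordiv a M) * K ≤ g
    · rw [if_pos hfa]
      rw [if_neg (by rw [key]; tauto)]
    · rw [if_neg hfa, hrest]
      by_cases h2 : ∀ t ∈ rest,
          (g + 1) + (rest.countP (fun u => decide (u ≤ t)) : Int) ≤ (PySem.Int.floordiv t M) * K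
      · rw [if_pos h2, if_pos (key.mpr ⟨hfa, h2⟩)]
      · rw [if_neg h2, if_neg (by rw [key]; tauto)]

-- B's any-over-set condition is the negation of A's universal rank condition
lemma alt_char (N M K : Int) (customer : List Int) :
    jingi_bread_store_alt N M K customer =
      (if ∀ t ∈ customer,
          (0 : Int) + (customer.countP (fun u => decide (u ≤ t)) : Int) ≤ (PySem.Int.floordiv t M) * K
       then "Possible" else "Impossible") := by
  unfold jingi_bread_store_alt
  by_cases h : ∀ t ∈ customer,
      (0 : Int) + (customer.countP (fun u => decide (u ≤ t)) : Int) ≤ (PySem.Int.floordiv t M) * K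
  · rw [if_pos h]
    rw [if_neg]
    intro hany
    rcases List.any_eq_true.mp hany with ⟨t, ht, hp⟩
    have htc : t ∈ customer := (PySem.Set.mem_ofList _ _).mp ht
    have := h t htc
    have hlt := of_decide_eq_true hp
    omega
  · rw [if_neg h]
    rw [if_pos]
    push_neg at h
    rcases h with ⟨t, ht, hlt⟩
    refine List.any_eq_true.mpr ⟨t, (PySem.Set.mem_ofList _ _).mpr ht, ?_⟩
    simp only [decide_eq_true_eq]
    omega

-- ===== VERDICT (by name: the statement is the Claim_ definition above) =====
theorem jingi_bread_store_spec : Claim_equal_jingi_bread_store := by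
  intro N M K customer _ _
  unfold Spec_jingi_bread_store jingi_bread_store
  rw [alt_char N M K customer]
  have hperm : (PySem.List.sorted customer (fun x => x) false).Perm customer :=
    PySem.List.sorted_perm ..
  have hpw : (PySem.List.sorted customer (fun x => x) false).Pairwise (· ≤ ·) := by
    have := PySem.List.sorted_pairwise (xs := customer) (key := fun x => x)
    simpa using this
  rw [loopA_char M K _ hpw 0]
  have hmem : ∀ t, t ∈ PySem.List.sorted customer (fun x => x) false ↔ t ∈ customer := by
    intro t; exact hperm.mem_iff
  have hcnt : ∀ t, (PySem.List.sorted customer (fun x => x) false).countP (fun u => decide (u ≤ t))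
      = customer.countP (fun u => decide (u ≤ t)) := by
    intro t; exact hperm.countP_eq _
  by_cases h : ∀ t ∈ customer,
      (0 : Int) + (customer.countP (fun u => decide (u ≤ t)) : Int) ≤ (PySem.Int.floordiv t M) * K
  · rw [if_pos h, if_pos (by intro t ht; rw [hcnt t]; exact h t ((hmem t).mp ht))]
  · rw [if_neg h, if_neg (by intro hc; exact h (by intro t ht; have := hc t ((hmem t).mpr ht); rwa [hcnt t] at this))]
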